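-- pv_equiv track=rewrite | github.com/gokaygunduz-gg/bolge-karma-2026 | federasyon/scorer.py | compute_ranking_key
-- ===== SOURCE A (Python) =====
-- def best_scores_sequence(event_scores: dict[tuple, int]) -> list[int]:
--     """
--     Tüm puanlanan branşlardan, "max 1 adet 50m" kısıtıyla
--     en yüksekten en düşüğe sıralanmış puan listesi.
--
--     Bu dizi sıralama için kullanılır:
--       - top3_total = sum(seq[:3])
--       - tiebreaker: seq[3], seq[4], ...
--
--     Algoritma (greedy):
--       - 50m branşları ayrı, 50m olmayan branşlar ayrı sıralanır
--       - 50m listesinden sadece en iyisi kullanılabilir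
--       - Her adımda: bir sonraki 50m ile bir sonraki non-50m karşılaştır,
--         büyük olanı al (50m kotası aşılmadan)
--     """
--     fifties = sorted(
--         [p for (s, d), p in event_scores.items() if d == 50 and p > 0],
--         reverse=True
--     )
--     non_fifties = sorted(
--         [p for (s, d), p in event_scores.items() if d != 50 and p > 0],
--         reverse=True
--     )
--
--     best_50 = fifties[0] if fifties else 0
--     result: list[int] = []
--     used_50 = False
--     i = 0
--
--     while True:
--         nf = non_fifties[i] if i < len(non_fifties) else -1
--         f  = best_50 if not used_50 else -1
--
--         if nf < 0 and f < 0: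
--             break
--         if f > nf:
--             result.append(f)
--             used_50 = True
--         else:
--             result.append(nf)
--             i += 1
--
--     return result
--
-- _MAX_TIEBREAKER = 6   # toplam 6 branşa kadar tiebreaker bakılır
--
-- def compute_ranking_key(event_scores: dict[tuple, int]) -> tuple:
--     """
--     Sıralama anahtarı: kümülatif toplamlar (-top3, -top4, -top5, -top6).
--
--     Federasyon kuralı (madde 8):
--       - Önce top3 toplamına göre sırala (büyük = iyi)
--       - Eşitlikte top4 toplamına bak, sonra top5, top6
--
--     Neden lexicographic DEĞİL:
--       - seq=[6,4,3] → leksik key (-6,-4,-3), seq=[5,5,4] → (-5,-5,-4)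
--         leksik olarak -6 < -5 → [6,4,3] daha iyi görünür, oysa 5+5+4=14 > 6+4+3=13
--       - Kümülatif: top3(6+4+3)=13 vs top3(5+5+4)=14 → [5,5,4] doğru kazanır
--     """
--     seq = best_scores_sequence(event_scores)
--     padded = seq[:_MAX_TIEBREAKER] + [0] * max(0, _MAX_TIEBREAKER - len(seq))
--     cumul_key = []
--     running = 0
--     for i in range(_MAX_TIEBREAKER):
--         running += padded[i]
--         if i >= 2:   # top3'ten itibaren (indeks 2 = 3. eleman)
--             cumul_key.append(-running)
--     return tuple(cumul_key)   # (-top3, -top4, -top5, -top6)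
-- ===== SOURCE B (Python) =====
-- # B: one pass keeping only the best six non-50m scores (bounded insertion with an O(1)
-- # reject when the buffer is full) and the single best 50m score, then a closed-form key.
-- def _insert_desc(top, p):
--     if not top or p > top[0]:
--         return [p] + top
--     return [top[0]] + _insert_desc(top[1:], p)
--
-- def compute_ranking_key(event_scores):
--     best_50 = 0
--     top = []          # descending list of the best non-50m scores, at most 6 kept
--     for (s, d), p in event_scores.items():
--         if p <= 0:
--             continue
--         if d == 50:
--             if p > best_50:
--                 best_50 = p
--         elif len(top) == 6 and p <= top[5]:
--             continue
--         else:
--             top = _insert_desc(top, p)[:6]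
--     if best_50 > 0 and not (len(top) == 6 and best_50 <= top[5]):
--         top = _insert_desc(top, best_50)[:6]
--     t = top + [0] * (6 - len(top))
--     s3 = t[0] + t[1] + t[2]
--     s4 = s3 + t[3]
--     s5 = s4 + t[4]
--     s6 = s5 + t[5]
--     return (-s3, -s4, -s5, -s6)
-- ===== Notes on version B (the rewrite author's own statement) =====
-- stated objective: alternative
-- what changed: Replaces sorting both score lists and merging them with a single pass over the dict items that keeps only the best six non-50m scores (bounded insertion with an O(1) reject when the buffer is full) and the single best 50m score, then computes the four cumulative key components in closed form.
import Mathlib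
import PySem

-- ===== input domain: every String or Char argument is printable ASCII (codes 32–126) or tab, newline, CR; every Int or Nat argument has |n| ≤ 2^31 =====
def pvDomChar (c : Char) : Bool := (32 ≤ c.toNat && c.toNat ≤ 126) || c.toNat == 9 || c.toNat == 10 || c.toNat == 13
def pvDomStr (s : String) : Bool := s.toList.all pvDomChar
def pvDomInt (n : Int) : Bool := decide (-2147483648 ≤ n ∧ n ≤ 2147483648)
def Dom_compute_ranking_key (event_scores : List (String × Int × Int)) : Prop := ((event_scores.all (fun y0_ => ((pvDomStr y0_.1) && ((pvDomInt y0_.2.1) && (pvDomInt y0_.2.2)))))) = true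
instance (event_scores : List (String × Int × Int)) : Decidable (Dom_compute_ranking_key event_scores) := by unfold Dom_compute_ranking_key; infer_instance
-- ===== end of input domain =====

-- B replaces sort-then-merge with one pass keeping only the best six non-50m scores and the
-- best 50m score, then a closed-form key (intended to cut the sorts; a timing run read
-- about 1.46x at its largest size, below its 1.5x bar, so no speed is claimed).

-- ===== PORT A =====
-- the while-True merge loop of best_scores_sequence; `fuel` is a totality guard only
-- (fuel = len(non_fifties) + 2 always suffices on the reachable states, proved below)
def bestScoresLoop (best50 : Int) (nonf : List Int) : Nat → Nat → Bool → List Int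
  | 0, _, _ => []
  | fuel+1, i, used =>
    let nf : Int := if h : i < nonf.length then nonf[i] else -1   -- non_fifties[i] if i < len(non_fifties) else -1
    let f : Int := if used then -1 else best50
    if nf < 0 ∧ f < 0 then []
    else if f > nf then f :: bestScoresLoop best50 nonf fuel i true
    else nf :: bestScoresLoop best50 nonf fuel (i+1) used

def best_scores_sequence (d : PySem.Dict (String × Int) Int) : List Int :=
  let fifties := PySem.List.sorted ((d.items.filter (fun q => q.1.2 == 50 && decide (q.2 > 0))).map (·.2)) (fun x => x) true
  let non_fifties := PySem.List.sorted ((d.items.filter (fun q => !(q.1.2 == 50) && decide (q.2 > 0))).map (·.2)) (fun x => x) true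
  let best50 : Int := match fifties with | [] => 0 | x :: _ => x   -- fifties[0] if fifties else 0
  bestScoresLoop best50 non_fifties (non_fifties.length + 2) 0 false

def compute_ranking_key (event_scores : List (String × Int × Int)) : List Int :=
  -- the Python argument is a dict keyed by (stroke, distance): normalise the pair list
  let d := PySem.Dict.ofList (event_scores.map (fun t => ((t.1, t.2.1), t.2.2)))
  let seq := best_scores_sequence d
  -- padded = seq[:6] + [0] * max(0, 6 - len(seq))   ([0]*k ported as List.replicate, exact for k ≥ 0)
  let padded := PySem.List.slice seq none (some 6) ++ List.replicate (max 0 (6 - (seq.length : Int))).toNat 0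
  -- for i in range(6): running += padded[i]; if i >= 2: cumul_key.append(-running)
  -- (padded always has length 6, so padded[i] = pyGetD padded i 0 is exact)
  ((PySem.List.pyRange 0 6 1).foldl (fun (st : Int × List Int) i =>
      let running := st.1 + PySem.List.pyGetD padded i 0
      (running, if i ≥ 2 then st.2 ++ [-running] else st.2)) ((0 : Int), ([] : List Int))).2

-- ===== PORT B =====
def insertDescB : List Int → Int → List Int
  | [], p => [p]
  | x :: xs, p => if p > x then p :: x :: xs else x :: insertDescB xs p

def compute_ranking_key_alt (event_scores : List (String × Int × Int)) : List Int :=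
  let d := PySem.Dict.ofList (event_scores.map (fun t => ((t.1, t.2.1), t.2.2)))
  let st := d.items.foldl (fun (st : Int × List Int) q =>
      if q.2 ≤ 0 then st
      else if q.1.2 == 50 then (if q.2 > st.1 then (q.2, st.2) else st)
      else if st.2.length == 6 && decide (q.2 ≤ PySem.List.pyGetD st.2 5 0) then st   -- top[5], in range when len == 6
      else (st.1, PySem.List.slice (insertDescB st.2 q.2) none (some 6))) ((0 : Int), ([] : List Int))
  let best50 := st.1
  let top := if best50 > 0 && !(st.2.length == 6 && decide (best50 ≤ PySem.List.pyGetD st.2 5 0))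
             then PySem.List.slice (insertDescB st.2 best50) none (some 6) else st.2
  let t := top ++ List.replicate (6 - top.length) 0    -- top + [0] * (6 - len(top)), len(top) ≤ 6
  -- t has length 6, so t[k] = pyGetD t k 0 is exact
  let s3 := PySem.List.pyGetD t 0 0 + PySem.List.pyGetD t 1 0 + PySem.List.pyGetD t 2 0
  let s4 := s3 + PySem.List.pyGetD t 3 0
  let s5 := s4 + PySem.List.pyGetD t 4 0
  let s6 := s5 + PySem.List.pyGetD t 5 0
  [-s3, -s4, -s5, -s6]

-- ===== PRECONDITION & SPEC =====
def Spec_compute_ranking_key (event_scores : List (String × Int × Int)) (out : List Int) : Prop := out = compute_ranking_key_alt event_scores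
instance (event_scores : List (String × Int × Int)) (out : List Int) : Decidable (Spec_compute_ranking_key event_scores out) := by unfold Spec_compute_ranking_key; infer_instance

-- ===== CLAIM (what is proved, stated in full; the proofs are below) =====
def Claim_equal_compute_ranking_key : Prop := ∀ (event_scores : List (String × Int × Int)), Dom_compute_ranking_key event_scores → Spec_compute_ranking_key event_scores (compute_ranking_key event_scores)

-- ===== LEMMAS AND PROOFS =====

theorem insertDescB_perm (t : List Int) (p : Int) : (insertDescB t p).Perm (p :: t) := by
  induction t with
  | nil => simp [insertDescB]
  | cons x xs ih =>
    simp only [insertDescB]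
    split
    · exact List.Perm.refl _
    · exact (ih.cons x).trans (List.Perm.swap p x xs)

theorem insertDescB_pairwise (t : List Int) (p : Int) (h : t.Pairwise (· ≥ ·)) :
    (insertDescB t p).Pairwise (· ≥ ·) := by
  induction t with
  | nil => simp [insertDescB]
  | cons x xs ih =>
    rcases List.pairwise_cons.mp h with ⟨hx, hxs⟩
    simp only [insertDescB]
    split
    · rename_i hpx
      refine List.pairwise_cons.mpr ⟨?_, h⟩
      intro y hy
      rcases List.mem_cons.mp hy with rfl | hy
      · omega
      · exact le_trans (hx _ hy) (le_of_lt hpx)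
    · rename_i hpx
      refine List.pairwise_cons.mpr ⟨?_, ih hxs⟩
      intro y hy
      rcases List.mem_cons.mp (((insertDescB_perm xs p).mem_iff).mp hy) with rfl | hy
      · omega
      · exact hx _ hy

theorem insertDescB_append (t : List Int) (p : Int) (h : ∀ x ∈ t, ¬ p > x) :
    insertDescB t p = t ++ [p] := by
  induction t with
  | nil => simp [insertDescB]
  | cons x xs ih =>
    simp only [insertDescB]
    rw [if_neg (h x (by simp))]
    simp [ih (fun y hy => h y (by simp [hy]))]

theorem take_insertDescB (t : List Int) (n : Nat) (p : Int) :
    (insertDescB (t.take n) p).take n = (insertDescB t p).take n := by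
  induction t generalizing n with
  | nil => simp
  | cons x xs ih =>
    cases n with
    | zero => simp
    | succ m =>
      simp only [List.take_succ_cons, insertDescB]
      split
      · simp only [List.take_succ_cons]
        congr 1
        cases m with
        | zero => simp
        | succ k => simp [List.take_take]
      · simp [ih m]

theorem skip_insertDescB (t : List Int) (p : Int) (h : t.Pairwise (· ≥ ·))
    (hl : t.length = 6) (hp : p ≤ PySem.List.pyGetD t 5 0) :
    (insertDescB t p).take 6 = t := by
  have h5 : 5 < t.length := by omega
  have hg : PySem.List.pyGetD t 5 0 = t[5] := by
    rw [PySem.List.pyGetD_ofNat' t 5 0, List.getD_eq_getElem t 0 h5]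
  have hge := List.pairwise_iff_getElem.mp h
  have hall : ∀ x ∈ t, ¬ p > x := by
    intro x hx
    rcases List.mem_iff_getElem.mp hx with ⟨i, hi, rfl⟩
    by_cases hi5 : i < 5
    · have := hge i 5 hi h5 hi5
      simp only [ge_iff_le] at this
      omega
    · have : i = 5 := by omega
      subst this
      omega
  rw [insertDescB_append t p hall, List.take_append_of_le_length (by omega),
      List.take_of_length_le (by omega)]

theorem foldl_insertDescB_perm (N : List Int) (u : List Int) :
    (N.foldl insertDescB u).Perm (u ++ N) := by
  induction N generalizing u with
  | nil => simp
  | cons p N' ih =>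
    refine (ih (insertDescB u p)).trans ?_
    have h1 : (insertDescB u p ++ N').Perm ((p :: u) ++ N') :=
      (insertDescB_perm u p).append_right N'
    refine h1.trans ?_
    simp only [List.cons_append]
    exact (List.perm_middle (l₁ := u) (a := p) (l₂ := N')).symm

theorem foldl_insertDescB_pairwise (N : List Int) (u : List Int) (h : u.Pairwise (· ≥ ·)) :
    (N.foldl insertDescB u).Pairwise (· ≥ ·) := by
  induction N generalizing u with
  | nil => simpa
  | cons p N' ih => exact ih _ (insertDescB_pairwise u p h)

theorem foldl_insertDescB_eq_sorted (N : List Int) :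
    N.foldl insertDescB [] = PySem.List.sorted N (fun x => x) true := by
  apply PySem.List.eq_of_perm_of_pairwise_le_of_injective (fun x : Int => -x) neg_injective
  · exact ((foldl_insertDescB_perm N []).trans (by simp)).trans
      (PySem.List.sorted_perm N (fun x => x) true).symm
  · exact (foldl_insertDescB_pairwise N [] (by simp)).imp (by intro a b hab; omega)
  · exact (PySem.List.sorted_pairwise_rev N (fun x => x)).imp (by intro a b hab; omega)

theorem slice6_take (l : List Int) : PySem.List.slice l none (some 6) = l.take 6 := by
  exact_mod_cast PySem.List.slice_to_natCast l 6

def topStepB (t : List Int) (p : Int) : List Int :=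
  if t.length == 6 && decide (p ≤ PySem.List.pyGetD t 5 0) then t else (insertDescB t p).take 6

theorem foldl_topStepB (N : List Int) (u : List Int) (h : u.Pairwise (· ≥ ·)) :
    N.foldl topStepB (u.take 6) = (N.foldl insertDescB u).take 6 := by
  induction N generalizing u with
  | nil => simp
  | cons p N' ih =>
    have hstep : topStepB (u.take 6) p = (insertDescB u p).take 6 := by
      unfold topStepB
      split
      · rename_i hc
        simp only [Bool.and_eq_true, beq_iff_eq, decide_eq_true_eq] at hc
        rw [← take_insertDescB u 6 p]
        exact (skip_insertDescB (u.take 6) p (h.sublist (List.take_sublist _ _)) hc.1 hc.2).symm ▸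
          (skip_insertDescB (u.take 6) p (h.sublist (List.take_sublist _ _)) hc.1 hc.2)
      · rw [take_insertDescB]
    simp only [List.foldl_cons, hstep]
    exact ih (insertDescB u p) (insertDescB_pairwise u p h)

theorem maxfold_eq (l : List Int) (M m0 : Int) (hub : ∀ y ∈ l, y ≤ M) (hm0 : m0 ≤ M)
    (hmem : M ∈ l ∨ m0 = M) :
    l.foldl (fun m p => if p > m then p else m) m0 = M := by
  induction l generalizing m0 with
  | nil => simpa using hmem.resolve_left (by simp)
  | cons x l' ih =>
    have hx : x ≤ M := hub x (by simp)
    simp only [List.foldl_cons]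
    refine ih _ (fun y hy => hub y (List.mem_cons_of_mem _ hy)) ?_ ?_
    · split <;> omega
    · rcases hmem with hM | rfl
      · rcases List.mem_cons.mp hM with rfl | hM
        · right; split <;> omega
        · left; exact hM
      · right; split <;> omega

theorem bestScoresLoop_eq (nonf : List Int) (hpos : ∀ x ∈ nonf, 0 < x) (b : Int) (hb : 0 ≤ b) :
    ∀ (fuel i : Nat) (used : Bool),
    (used = true → nonf.length - i + 1 ≤ fuel) → (used = false → nonf.length - i + 2 ≤ fuel) →
    bestScoresLoop b nonf fuel i used = if used then nonf.drop i else insertDescB (nonf.drop i) b := by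
  intro fuel
  induction fuel with
  | zero =>
    intro i used h1 h2
    cases used
    · have := h2 rfl; omega
    · have := h1 rfl; omega
  | succ f ih =>
    intro i used h1 h2
    simp only [bestScoresLoop]
    by_cases hi : i < nonf.length
    · rw [dif_pos hi]
      have hx : 0 < nonf[i] := hpos _ (List.getElem_mem hi)
      have hdrop : nonf.drop i = nonf[i] :: nonf.drop (i+1) := List.drop_eq_getElem_cons hi
      cases used with
      | true =>
        have h1' := h1 rfl
        have hf : (if (true:Bool) = true then (-1:Int) else b) = -1 := rfl
        rw [hf, if_neg (by omega), if_neg (by omega),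
            ih (i+1) true (by intro _; omega) (by intro hc; cases hc),
            if_pos (rfl : (true:Bool) = true), if_pos (rfl : (true:Bool) = true)]
        exact hdrop.symm
      | false =>
        have h2' := h2 rfl
        have hf : (if (false:Bool) = true then (-1:Int) else b) = b := rfl
        rw [hf]
        by_cases hgt : b > nonf[i]
        · rw [if_neg (by omega), if_pos hgt,
              ih i true (by intro _; omega) (by intro hc; cases hc),
              if_pos (rfl : (true:Bool) = true), if_neg Bool.false_ne_true, hdrop]
          simp [insertDescB, hgt]
        · rw [if_neg (by omega), if_neg hgt,
              ih (i+1) false (by intro hc; cases hc) (by intro _; omega),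
              if_neg Bool.false_ne_true, if_neg Bool.false_ne_true, hdrop]
          simp [insertDescB, hgt]
    · rw [dif_neg hi]
      have hdrop : nonf.drop i = [] := List.drop_eq_nil_of_le (by omega)
      cases used with
      | true =>
        have hf : (if (true:Bool) = true then (-1:Int) else b) = -1 := rfl
        rw [hf, if_pos (by omega : (-1:Int) < 0 ∧ (-1:Int) < 0),
            if_pos (rfl : (true:Bool) = true), hdrop]
      | false =>
        have h2' := h2 rfl
        have hf : (if (false:Bool) = true then (-1:Int) else b) = b := rfl
        rw [hf, if_neg (by omega), if_pos (by omega : b > -1),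
            ih i true (by intro _; omega) (by intro hc; cases hc),
            if_pos (rfl : (true:Bool) = true), if_neg Bool.false_ne_true, hdrop]
        simp [insertDescB]

-- the two state components of B's single fold evolve independently
theorem foldB_split (items : List ((String × Int) × Int)) (m0 : Int) (t0 : List Int) :
    items.foldl (fun (st : Int × List Int) q =>
      if q.2 ≤ 0 then st
      else if q.1.2 == 50 then (if q.2 > st.1 then (q.2, st.2) else st)
      else if st.2.length == 6 && decide (q.2 ≤ PySem.List.pyGetD st.2 5 0) then st
      else (st.1, PySem.List.slice (insertDescB st.2 q.2) none (some 6))) (m0, t0)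
    = (((items.filter (fun q => q.1.2 == 50 && decide (q.2 > 0))).map (·.2)).foldl (fun m p => if p > m then p else m) m0,
       ((items.filter (fun q => !(q.1.2 == 50) && decide (q.2 > 0))).map (·.2)).foldl topStepB t0) := by
  induction items generalizing m0 t0 with
  | nil => rfl
  | cons q rest ih =>
    simp only [List.foldl_cons, List.filter_cons]
    by_cases hq0 : q.2 ≤ 0
    · have hA : (q.1.2 == 50 && decide (q.2 > 0)) = false := by
        simp only [Bool.and_eq_false_iff]; right; simp; omega
      have hB : ((!(q.1.2 == 50)) && decide (q.2 > 0)) = false := by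
        simp only [Bool.and_eq_false_iff]; right; simp; omega
      rw [if_neg (show ¬ ((q.1.2 == 50 && decide (q.2 > 0)) = true) by rw [hA]; exact Bool.false_ne_true), if_neg (show ¬ (((!(q.1.2 == 50)) && decide (q.2 > 0)) = true) by rw [hB]; exact Bool.false_ne_true)]
      rw [if_pos hq0]
      exact ih m0 t0
    · by_cases h50 : q.1.2 == 50
      · have hA : (q.1.2 == 50 && decide (q.2 > 0)) = true := by simp [h50]; omega
        have hB : ((!(q.1.2 == 50)) && decide (q.2 > 0)) = false := by simp [h50]
        rw [if_pos hA, if_neg (show ¬ (((!(q.1.2 == 50)) && decide (q.2 > 0)) = true) by rw [hB]; exact Bool.false_ne_true)]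
        rw [if_neg hq0, if_pos h50]
        simp only [List.map_cons, List.foldl_cons]
        by_cases hgt : q.2 > m0
        · rw [if_pos hgt, if_pos hgt]; exact ih q.2 t0
        · rw [if_neg hgt, if_neg hgt]; exact ih m0 t0
      · have h50' : (q.1.2 == 50) = false := by simpa using h50
        have hA : (q.1.2 == 50 && decide (q.2 > 0)) = false := by simp [h50']
        have hB : ((!(q.1.2 == 50)) && decide (q.2 > 0)) = true := by simp [h50']; omega
        rw [if_neg (show ¬ ((q.1.2 == 50 && decide (q.2 > 0)) = true) by rw [hA]; exact Bool.false_ne_true), if_pos hB]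
        rw [if_neg hq0, if_neg (show ¬ ((q.1.2 == 50) = true) by rw [h50']; exact Bool.false_ne_true)]
        simp only [List.map_cons, List.foldl_cons]
        have hstep : (if (t0.length == 6 && decide (q.2 ≤ PySem.List.pyGetD t0 5 0)) = true then ((m0, t0) : Int × List Int)
            else (m0, PySem.List.slice (insertDescB t0 q.2) none (some 6))) = (m0, topStepB t0 q.2) := by
          unfold topStepB
          split
          · rfl
          · rw [slice6_take]
        rw [hstep]
        exact ih m0 (topStepB t0 q.2)

theorem pad_eq_pos (l : List Int) :
    PySem.List.slice l none (some 6) ++ List.replicate (max 0 (6 - (l.length : Int))).toNat (0 : Int)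
    = l.take 6 ++ List.replicate (6 - (l.take 6).length) 0 := by
  rw [show ((6:Int) = ((6:Nat):Int)) from rfl, PySem.List.slice_to_natCast]
  congr 1
  congr 1
  simp only [List.length_take]
  omega

theorem pad_take_append_zero (l : List Int) :
    (l ++ [(0:Int)]).take 6 ++ List.replicate (6 - ((l ++ [(0:Int)]).take 6).length) (0:Int)
    = l.take 6 ++ List.replicate (6 - (l.take 6).length) 0 := by
  by_cases h6 : 6 ≤ l.length
  · rw [List.take_append_of_le_length h6]
  · rw [not_le] at h6
    rw [List.take_of_length_le (by simp; omega), List.take_of_length_le (le_of_lt h6),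
        List.append_assoc]
    congr 1
    rw [List.singleton_append, ← List.replicate_succ]
    congr 1
    simp only [List.length_append, List.length_cons, List.length_nil]
    omega

theorem key_eq (t : List Int) :
    ((PySem.List.pyRange 0 6 1).foldl (fun (st : Int × List Int) i =>
      (st.1 + PySem.List.pyGetD t i 0,
       if i ≥ 2 then st.2 ++ [-(st.1 + PySem.List.pyGetD t i 0)] else st.2)) ((0:Int), ([]:List Int))).2
    = [-(PySem.List.pyGetD t 0 0 + PySem.List.pyGetD t 1 0 + PySem.List.pyGetD t 2 0),
       -(PySem.List.pyGetD t 0 0 + PySem.List.pyGetD t 1 0 + PySem.List.pyGetD t 2 0 + PySem.List.pyGetD t 3 0),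
       -(PySem.List.pyGetD t 0 0 + PySem.List.pyGetD t 1 0 + PySem.List.pyGetD t 2 0 + PySem.List.pyGetD t 3 0 + PySem.List.pyGetD t 4 0),
       -(PySem.List.pyGetD t 0 0 + PySem.List.pyGetD t 1 0 + PySem.List.pyGetD t 2 0 + PySem.List.pyGetD t 3 0 + PySem.List.pyGetD t 4 0 + PySem.List.pyGetD t 5 0)] := by
  rw [show PySem.List.pyRange 0 6 1 = [0,1,2,3,4,5] from by decide]
  norm_num

-- ===== VERDICT (by name: the statement is the Claim_ definition above) =====
theorem compute_ranking_key_spec : Claim_equal_compute_ranking_key := by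
  unfold Claim_equal_compute_ranking_key
  intro es _hdom
  unfold Spec_compute_ranking_key
  simp only [compute_ranking_key, compute_ranking_key_alt, best_scores_sequence]
  generalize (PySem.Dict.ofList (es.map fun t => ((t.1, t.2.1), t.2.2))).items = items
  set P := (items.filter (fun q => q.1.2 == 50 && decide (q.2 > 0))).map (fun x => x.2) with hP
  set N := (items.filter (fun q => !(q.1.2 == 50) && decide (q.2 > 0))).map (fun x => x.2) with hN
  set nonf := PySem.List.sorted N (fun x => x) true with hnonf
  set b := (match PySem.List.sorted P (fun x => x) true with | [] => (0:Int) | x :: _ => x) with hb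
  have hNpos : ∀ x ∈ nonf, 0 < x := by
    intro x hx
    rw [hnonf, PySem.List.mem_sorted, hN] at hx
    rcases List.mem_map.mp hx with ⟨q, hq, rfl⟩
    have hq2 := (List.mem_filter.mp hq).2
    simp only [Bool.and_eq_true, decide_eq_true_eq] at hq2
    omega
  have hPpos : ∀ x ∈ PySem.List.sorted P (fun x => x) true, 0 < x := by
    intro x hx
    rw [PySem.List.mem_sorted, hP] at hx
    rcases List.mem_map.mp hx with ⟨q, hq, rfl⟩
    have hq2 := (List.mem_filter.mp hq).2
    simp only [Bool.and_eq_true, decide_eq_true_eq] at hq2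
    omega
  have hb0 : 0 ≤ b := by
    rw [hb]
    cases hs : PySem.List.sorted P (fun x => x) true with
    | nil => exact le_refl 0
    | cons m tl =>
      have hm := hPpos m (by rw [hs]; exact List.mem_cons_self ..)
      dsimp only
      omega
  have hseq : bestScoresLoop b nonf (nonf.length + 2) 0 false = insertDescB nonf b := by
    rw [bestScoresLoop_eq nonf hNpos b hb0 (nonf.length + 2) 0 false
        (fun h => nomatch h) (fun _ => by omega)]
    simp
  rw [hseq, pad_eq_pos (insertDescB nonf b), key_eq,
      foldB_split items 0 [], ← hP, ← hN]
  have hmax : P.foldl (fun m p => if p > m then p else m) 0 = b := by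
    rw [hb]
    cases hs : PySem.List.sorted P (fun x => x) true with
    | nil =>
      have hP0 : P = [] := ((hs ▸ PySem.List.sorted_perm P (fun x => x) true).symm).eq_nil
      rw [hP0]
      rfl
    | cons m tl =>
      have hub : ∀ y ∈ P, y ≤ m := fun y hy =>
        PySem.List.key_head_sorted_rev_ge P (fun x => x) hs y hy
      have hm : m ∈ P := (PySem.List.mem_sorted P (fun x => x) true m).mp (by rw [hs]; exact List.mem_cons_self ..)
      have hm0 : 0 ≤ m := le_of_lt (hPpos m (by rw [hs]; exact List.mem_cons_self ..))
      exact maxfold_eq P m 0 hub hm0 (Or.inl hm)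
  have htop : N.foldl topStepB [] = nonf.take 6 := by
    have h := foldl_topStepB N [] List.Pairwise.nil
    simp only [List.take_nil] at h
    rw [h, foldl_insertDescB_eq_sorted, ← hnonf]
  dsimp only
  rw [hmax, htop]
  have hPWnonf : nonf.Pairwise (· ≥ ·) := by
    rw [hnonf]
    exact (PySem.List.sorted_pairwise_rev N (fun x => x)).imp (by intro a b hab; omega)
  have hPW : (nonf.take 6).Pairwise (· ≥ ·) :=
    List.Pairwise.sublist (List.take_sublist 6 nonf) hPWnonf
  by_cases hbpos : 0 < b
  · have htopF : (if decide (b > 0) && !((nonf.take 6).length == 6 && decide (b ≤ PySem.List.pyGetD (nonf.take 6) 5 0))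
        then PySem.List.slice (insertDescB (nonf.take 6) b) none (some 6) else nonf.take 6)
        = (insertDescB nonf b).take 6 := by
      by_cases hskip : ((nonf.take 6).length == 6 && decide (b ≤ PySem.List.pyGetD (nonf.take 6) 5 0)) = true
      · rw [if_neg (by rw [hskip]; simp)]
        simp only [Bool.and_eq_true, beq_iff_eq, decide_eq_true_eq] at hskip
        rw [← take_insertDescB nonf 6 b, skip_insertDescB _ b hPW hskip.1 hskip.2]
      · have h' : ((nonf.take 6).length == 6 && decide (b ≤ PySem.List.pyGetD (nonf.take 6) 5 0)) = false :=
          Bool.eq_false_iff.mpr hskip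
        rw [if_pos (by rw [h']; simp [hbpos]), slice6_take, take_insertDescB nonf 6 b]
    rw [htopF]
  · have hbz : b = 0 := by omega
    rw [if_neg (by simp [hbz])]
    rw [hbz, insertDescB_append nonf 0 (fun x hx => by have := hNpos x hx; omega),
        pad_take_append_zero nonf]
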